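-- pv_equiv track=rewrite | github.com/rorySomething/computationalChemistryTools | vasp/vaspAssembleBands.py | getTotalKPoints
-- ===== SOURCE A (Python) =====
-- def getTotalKPoints(points, linePoints):
--   i = 0 ; start = 1 ; restart = False
--   nPoints = min(1, len(points))
--   while i < (len(points)-1):
--     p0 = points[i]; p1 = points[i+1]
--     if p0 == "-" or p1 == "-":
--       i += 1
--       start = 0
--       restart = True
--       continue
--     elif restart:
--       restart = False
--     else:
--       start = 1
--     # start = 1 avoids double counting each listed kpt
--     # nPoints is initially == 1, for the 1st point
--     # Then continuously add linePoints from p0 to p1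
--     # If there is a break from '-' entry
--     # start = 0, to acount for the 1st leading point
--     # of a new set of points separate from the previous set
--     #   If that makes sense
--     for j in range(start,linePoints+1):
--       nPoints += 1
--     i += 1
--   return nPoints
-- ===== SOURCE B (Python) =====
-- def getTotalKPoints(points, linePoints):
--     # One pass over adjacent pairs; per-segment point count computed by
--     # direct arithmetic instead of an inner counting loop.
--     if not points:
--         return 0
--     total = 1
--     in_break = False
--     for p0, p1 in zip(points, points[1:]):
--         if p0 == "-" or p1 == "-":
--             in_break = True
--         else:
--             total += max(0, linePoints + 1 - (0 if in_break else 1))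
--             in_break = False
--     return total
-- ===== Notes on version B (the rewrite author's own statement) =====
-- stated objective: faster
-- what changed: Replaces A's inner point-by-point counting loop (range(start, linePoints+1) incrementing nPoints) with a direct per-segment arithmetic addition max(0, linePoints+1-start) in a single fold over adjacent pairs.
import Mathlib
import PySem

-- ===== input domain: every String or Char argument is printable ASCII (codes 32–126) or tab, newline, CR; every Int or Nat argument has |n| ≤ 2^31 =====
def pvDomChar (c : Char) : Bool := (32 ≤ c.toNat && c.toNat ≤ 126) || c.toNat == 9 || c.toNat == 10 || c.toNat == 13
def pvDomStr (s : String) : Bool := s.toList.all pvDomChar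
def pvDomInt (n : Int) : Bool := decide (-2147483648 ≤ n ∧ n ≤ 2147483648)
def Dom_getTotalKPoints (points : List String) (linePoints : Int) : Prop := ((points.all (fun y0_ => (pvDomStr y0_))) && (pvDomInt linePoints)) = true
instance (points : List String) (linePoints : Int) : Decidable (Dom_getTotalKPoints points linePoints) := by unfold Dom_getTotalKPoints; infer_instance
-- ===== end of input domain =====

-- B replaces A's inner point-by-point counting loop by a direct arithmetic addition per
-- segment (asymptotically faster in linePoints); return values are identical everywhere.

-- ===== PORT A =====
-- A's while loop advances i by exactly 1 each iteration and only reads points[i], points[i+1];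
-- it is ported as the obvious structural recursion on the suffix of `points` starting at i,
-- carrying the loop state (start, restart, nPoints) unchanged.
def getTotalKPointsLoop (linePoints : Int) : List String → Int → Bool → Int → Int
  | p0 :: p1 :: rest, start, restart, nPoints =>
    if p0 = "-" ∨ p1 = "-" then
      -- i += 1; start = 0; restart = True; continue
      getTotalKPointsLoop linePoints (p1 :: rest) 0 true nPoints
    else
      let start' := if restart then start else 1
      -- for j in range(start, linePoints+1): nPoints += 1
      let nPoints' := (PySem.List.pyRange start' (linePoints + 1) 1).foldl
        (fun acc _ => acc + 1) nPoints
      getTotalKPointsLoop linePoints (p1 :: rest) start' false nPoints'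
  | _, _, _, nPoints => nPoints

def getTotalKPoints (points : List String) (linePoints : Int) : Int :=
  let nPoints : Int := min 1 (points.length : Int)
  getTotalKPointsLoop linePoints points 1 false nPoints

-- ===== PORT B =====
-- one fold over zip(points, points[1:]); state = (total, in_break)
def getTotalKPoints_alt (points : List String) (linePoints : Int) : Int :=
  match points with
  | [] => 0
  | _ =>
    ((points.zip points.tail).foldl
      (fun (st : Int × Bool) (pq : String × String) =>
        if pq.1 = "-" ∨ pq.2 = "-" then (st.1, true)
        else (st.1 + max 0 (linePoints + 1 - (if st.2 then 0 else 1)), false))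
      (1, false)).1

-- ===== PRECONDITION & SPEC =====
def Spec_getTotalKPoints (points : List String) (linePoints : Int) (out : Int) : Prop := out = getTotalKPoints_alt points linePoints
instance (points : List String) (linePoints : Int) (out : Int) : Decidable (Spec_getTotalKPoints points linePoints out) := by unfold Spec_getTotalKPoints; infer_instance

-- ===== CLAIM (what is proved, stated in full; the proofs are below) =====
def Claim_equal_getTotalKPoints : Prop := ∀ (points : List String) (linePoints : Int), Dom_getTotalKPoints points linePoints → Spec_getTotalKPoints points linePoints (getTotalKPoints points linePoints)

-- ===== LEMMAS AND PROOFS =====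

-- the inner counting loop of A adds exactly the length of the range
theorem foldl_add_one_range (l : List Int) (n : Int) :
    l.foldl (fun acc _ => acc + 1) n = n + l.length := by
  induction l generalizing n with
  | nil => simp
  | cons x xs ih => simp [List.foldl, ih]; ring

-- the loop of A equals B's fold over adjacent pairs, given the invariant restart → start = 0
theorem loop_eq_fold (linePoints : Int) (l : List String) :
    ∀ (start : Int) (restart : Bool) (n : Int), (restart = true → start = 0) →
      getTotalKPointsLoop linePoints l start restart n =
        ((l.zip l.tail).foldl
          (fun (st : Int × Bool) (pq : String × String) =>
            if pq.1 = "-" ∨ pq.2 = "-" then (st.1, true)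
            else (st.1 + max 0 (linePoints + 1 - (if st.2 then 0 else 1)), false))
          (n, restart)).1 := by
  induction l with
  | nil => intro start restart n _; simp [getTotalKPointsLoop]
  | cons p0 rest ih =>
    intro start restart n hinv
    cases rest with
    | nil => simp [getTotalKPointsLoop]
    | cons p1 rest' =>
      by_cases hdash : p0 = "-" ∨ p1 = "-"
      · rw [show getTotalKPointsLoop linePoints (p0 :: p1 :: rest') start restart n =
              getTotalKPointsLoop linePoints (p1 :: rest') 0 true n by
            simp [getTotalKPointsLoop, hdash]]
        rw [ih 0 true n (fun _ => rfl)]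
        simp [hdash]
      · rw [show getTotalKPointsLoop linePoints (p0 :: p1 :: rest') start restart n =
              getTotalKPointsLoop linePoints (p1 :: rest') (if restart then start else 1) false
                ((PySem.List.pyRange (if restart then start else 1) (linePoints + 1) 1).foldl
                  (fun acc _ => acc + 1) n) by
            simp [getTotalKPointsLoop, hdash]]
        rw [ih _ false _ (by simp)]
        rw [foldl_add_one_range, PySem.List.length_pyRange_one]
        rw [show (p0 :: p1 :: rest').zip (p0 :: p1 :: rest').tail
              = (p0, p1) :: ((p1 :: rest').zip (p1 :: rest').tail) from rfl]
        rw [List.foldl_cons, if_neg hdash]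
        congr 2
        cases restart with
        | false =>
          simp only [Bool.false_eq_true, if_false, Prod.mk.injEq]
          exact ⟨by omega, trivial⟩
        | true =>
          simp only [hinv rfl, if_true, Prod.mk.injEq]
          exact ⟨by omega, trivial⟩

-- ===== VERDICT (by name: the statement is the Claim_ definition above) =====
theorem getTotalKPoints_spec : Claim_equal_getTotalKPoints := by
  intro points linePoints _
  unfold Spec_getTotalKPoints getTotalKPoints getTotalKPoints_alt
  cases points with
  | nil => simp [getTotalKPointsLoop]
  | cons p rest =>
    rw [loop_eq_fold linePoints (p :: rest) 1 false _ (by simp)]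
    simp
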